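-- pv_equiv track=rewrite | github.com/ope079/qa-python-exercises | exercises/near.py | near
-- ===== SOURCE A (Python) =====
-- def near(string1, string2):
--     answer = False
--     count = 0
--     string3 = string1.copy()
--     while count < len(string3):
--         del string3[count]
--         if  string3 == string2:
--             answer = True
--         count += 1
--         string3 = string1.copy()
--     return answer
-- ===== SOURCE B (Python) =====
-- def near(string1, string2):
--     # One linear divergence-finding pass instead of A's n full delete-and-compare passes.
--     if len(string1) != len(string2) + 1:
--         return False
--     i = 0
--     while i < len(string2) and string1[i] == string2[i]:
--         i += 1
--     return string1[i+1:] == string2[i:]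
-- ===== Notes on version B (the rewrite author's own statement) =====
-- stated objective: faster
-- what changed: Replaces A's loop of n delete-one-copy-and-compare-whole-list passes with a length check, a single scan to the first mismatch index, and one suffix comparison.
import Mathlib
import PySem

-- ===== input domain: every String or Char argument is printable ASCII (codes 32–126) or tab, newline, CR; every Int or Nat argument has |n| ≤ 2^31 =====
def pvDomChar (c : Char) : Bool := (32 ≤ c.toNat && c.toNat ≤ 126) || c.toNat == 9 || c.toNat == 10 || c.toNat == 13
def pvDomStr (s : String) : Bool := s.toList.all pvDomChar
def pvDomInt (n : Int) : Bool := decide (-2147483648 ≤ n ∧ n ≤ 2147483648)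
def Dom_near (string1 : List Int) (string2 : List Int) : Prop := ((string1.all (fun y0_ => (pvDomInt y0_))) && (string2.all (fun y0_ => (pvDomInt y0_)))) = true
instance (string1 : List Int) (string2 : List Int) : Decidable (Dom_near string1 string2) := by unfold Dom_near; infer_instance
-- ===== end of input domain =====

-- B replaces A's quadratic delete-one-and-compare-whole-list loop with a length check,
-- a single first-mismatch scan and one suffix comparison (objective: faster).


-- ===== PORT A =====
-- while count < len(string3): del string3[count]; if string3 == string2: answer = True; count += 1; string3 = string1.copy()
-- `del string3[count]` with 0 ≤ count < len is exactly List.eraseIdx.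
def nearLoop (string1 : List Int) (string2 : List Int) (count : Nat) (answer : Bool) : Bool :=
  if count < string1.length then
    nearLoop string1 string2 (count + 1)
      (if string1.eraseIdx count = string2 then true else answer)
  else answer
termination_by string1.length - count

def near (string1 : List Int) (string2 : List Int) : Bool :=
  nearLoop string1 string2 0 false

-- ===== PORT B =====
-- while i < len(string2) and string1[i] == string2[i]: i += 1
-- (string1[i] with 0 ≤ i < len(string2) < len(string1) is exactly getD; indices stay in range.)
def altScan (string1 : List Int) (string2 : List Int) (i : Nat) : Nat :=
  if i < string2.length ∧ string1.getD i 0 = string2.getD i 0 then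
    altScan string1 string2 (i + 1)
  else i
termination_by string2.length - i

-- return string1[i+1:] == string2[i:]  (nonnegative slice-to-end = drop)
def near_alt (string1 : List Int) (string2 : List Int) : Bool :=
  if string1.length ≠ string2.length + 1 then false
  else
    let i := altScan string1 string2 0
    decide (string1.drop (i + 1) = string2.drop i)

-- ===== PRECONDITION & SPEC =====
def Spec_near (string1 : List Int) (string2 : List Int) (out : Bool) : Prop := out = near_alt string1 string2
instance (string1 : List Int) (string2 : List Int) (out : Bool) : Decidable (Spec_near string1 string2 out) := by unfold Spec_near; infer_instance

-- ===== CLAIM (what is proved, stated in full; the proofs are below) =====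
def Claim_equal_near : Prop := ∀ (string1 : List Int) (string2 : List Int), Dom_near string1 string2 → Spec_near string1 string2 (near string1 string2)

-- ===== LEMMAS AND PROOFS =====

lemma nearLoop_eq (s1 s2 : List Int) : ∀ (count : Nat) (ans : Bool),
    nearLoop s1 s2 count ans
      = (ans || decide (∃ i < s1.length, count ≤ i ∧ s1.eraseIdx i = s2)) := by
  intro count ans
  fun_induction nearLoop s1 s2 count ans with
  | case1 count ans h ih =>
    simp only [dite_eq_ite] at ih
    rw [ih]
    by_cases hc : s1.eraseIdx count = s2
    · have hR : ∃ i < s1.length, count ≤ i ∧ s1.eraseIdx i = s2 := ⟨count, h, le_refl _, hc⟩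
      simp [hc, hR]
    · simp only [if_neg hc]
      congr 1
      rw [decide_eq_decide]
      constructor
      · rintro ⟨i, hi, hle, he⟩; exact ⟨i, hi, Nat.le_of_succ_le hle, he⟩
      · rintro ⟨i, hi, hle, he⟩
        refine ⟨i, hi, ?_, he⟩
        rcases Nat.lt_or_ge count i with h' | h'
        · exact h'
        · exfalso
          have hic : i = count := Nat.le_antisymm h' hle
          rw [hic] at he
          exact hc he
  | case2 count ans h =>
    have : ¬ ∃ i < s1.length, count ≤ i ∧ s1.eraseIdx i = s2 := by
      rintro ⟨i, hi, hle, _⟩; omega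
    simp [this]

lemma near_eq (s1 s2 : List Int) :
    near s1 s2 = decide (∃ i < s1.length, s1.eraseIdx i = s2) := by
  rw [near, nearLoop_eq]
  simp only [Bool.false_or]
  rw [decide_eq_decide]
  constructor
  · rintro ⟨i, hi, _, he⟩; exact ⟨i, hi, he⟩
  · rintro ⟨i, hi, he⟩; exact ⟨i, hi, Nat.zero_le _, he⟩

lemma altScan_shift (a b : Int) (s1 s2 : List Int) : ∀ i : Nat,
    altScan (a :: s1) (b :: s2) (i + 1) = altScan s1 s2 i + 1 := by
  intro i
  fun_induction altScan s1 s2 i with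
  | case1 i h ih =>
    rw [altScan]
    simp only [List.length_cons, List.getD_cons_succ]
    rw [if_pos ⟨Nat.succ_lt_succ h.1, h.2⟩, ih]
  | case2 i h =>
    rw [altScan]
    rw [if_neg]
    intro ⟨h1, h2⟩
    exact h ⟨Nat.lt_of_succ_lt_succ (by simpa using h1), by simpa using h2⟩

lemma exists_erase_cons_ne {a b : Int} {t1 t2 : List Int} (hab : a ≠ b) :
    (∃ i < (a :: t1).length, (a :: t1).eraseIdx i = b :: t2) ↔ t1 = b :: t2 := by
  constructor
  · rintro ⟨i, hi, he⟩
    cases i with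
    | zero => simpa using he
    | succ j =>
      exfalso
      rw [List.eraseIdx_cons_succ] at he
      exact hab (by injection he)
  · intro h; exact ⟨0, Nat.succ_pos _, by simpa using h⟩

lemma exists_erase_cons_eq {a : Int} {t1 t2 : List Int} :
    (∃ i < (a :: t1).length, (a :: t1).eraseIdx i = a :: t2) ↔
      (∃ j < t1.length, t1.eraseIdx j = t2) := by
  constructor
  · rintro ⟨i, hi, he⟩
    cases i with
    | zero =>
      have h0 : t1 = a :: t2 := by simpa using he
      exact ⟨0, by simp [h0], by simp [h0]⟩
    | succ j =>
      rw [List.eraseIdx_cons_succ] at he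
      exact ⟨j, Nat.lt_of_succ_lt_succ (by simpa using hi), by injection he⟩
  · rintro ⟨j, hj, he⟩
    exact ⟨j + 1, Nat.succ_lt_succ (by simpa using hj), by simp [he]⟩

lemma scan_eq_exists : ∀ (s2 s1 : List Int), s1.length = s2.length + 1 →
    (decide (s1.drop (altScan s1 s2 0 + 1) = s2.drop (altScan s1 s2 0))
      = decide (∃ i < s1.length, s1.eraseIdx i = s2)) := by
  intro s2
  induction s2 with
  | nil =>
    intro s1 hl
    match s1, hl with
    | [a], _ =>
      rw [altScan]
      simp
  | cons b t2 ih =>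
    intro s1 hl
    match s1, hl with
    | a :: t1, hl =>
      have hlt : t1.length = t2.length + 1 := by simpa using hl
      by_cases hab : a = b
      · subst hab
        rw [altScan]
        rw [if_pos ⟨Nat.succ_pos _, rfl⟩]
        rw [altScan_shift]
        have hdrop :
            ((a :: t1).drop (altScan t1 t2 0 + 1 + 1) = (a :: t2).drop (altScan t1 t2 0 + 1))
              ↔ (t1.drop (altScan t1 t2 0 + 1) = t2.drop (altScan t1 t2 0)) := by
          simp [List.drop_succ_cons]
        rw [decide_eq_decide]
        exact hdrop.trans ((decide_eq_decide.mp (ih t1 hlt)).trans exists_erase_cons_eq.symm)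
      · rw [altScan]
        rw [if_neg (by intro h; exact hab (by simpa using h.2))]
        have hdrop : (List.drop (0 + 1) (a :: t1) = List.drop 0 (b :: t2)) ↔ (t1 = b :: t2) := by
          simp
        rw [decide_eq_decide]
        exact hdrop.trans (exists_erase_cons_ne hab).symm

lemma length_of_exists_erase {s1 s2 : List Int}
    (h : ∃ i < s1.length, s1.eraseIdx i = s2) : s1.length = s2.length + 1 := by
  rcases h with ⟨i, hi, he⟩
  have := List.length_eraseIdx (l := s1) (i := i)
  rw [he, if_pos hi] at this
  omega

-- ===== VERDICT (by name: the statement is the Claim_ definition above) =====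
theorem near_spec : Claim_equal_near := by
  intro s1 s2 _
  unfold Spec_near near_alt
  rw [near_eq]
  by_cases hl : s1.length = s2.length + 1
  · rw [if_neg (by simpa using hl)]
    exact (scan_eq_exists s2 s1 hl).symm
  · rw [if_pos hl]
    simp only [decide_eq_false_iff_not]
    intro h
    exact hl (length_of_exists_erase h)
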